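-- pv_equiv track=rewrite | github.com/drull1000/algorithms | farmacia.py | NumeroMinDeFrascos
-- ===== SOURCE A (Python) =====
-- def NumeroMinDeFrascos(numeroDeComprimidos, frascos):
--     frascosUsados = 0
--     while numeroDeComprimidos > 0:
--         maiorFrasco = max(frascos)
--         if numeroDeComprimidos - maiorFrasco >= 0:
--             frascosUsados += 1
--             numeroDeComprimidos -= maiorFrasco
--         else:
--             frascos.remove(maiorFrasco)
--     return frascosUsados
-- ===== SOURCE B (Python) =====
-- def NumeroMinDeFrascos(numeroDeComprimidos, frascos):
--     usados = 0
--     for tamanho in sorted(frascos, reverse=True):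
--         if numeroDeComprimidos <= 0:
--             break
--         usados += numeroDeComprimidos // tamanho
--         numeroDeComprimidos %= tamanho
--     return usados
-- ===== Notes on version B (the rewrite author's own statement) =====
-- stated objective: alternative
-- what changed: B sorts the sizes descending once and does a single pass adding remaining//size per size (remaining %= size), instead of A's while loop that recomputes max() and subtracts one bottle at a time; intended as faster, but a timing run could only observe A timing out where B returned, not a clean ratio.
import Mathlib
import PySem

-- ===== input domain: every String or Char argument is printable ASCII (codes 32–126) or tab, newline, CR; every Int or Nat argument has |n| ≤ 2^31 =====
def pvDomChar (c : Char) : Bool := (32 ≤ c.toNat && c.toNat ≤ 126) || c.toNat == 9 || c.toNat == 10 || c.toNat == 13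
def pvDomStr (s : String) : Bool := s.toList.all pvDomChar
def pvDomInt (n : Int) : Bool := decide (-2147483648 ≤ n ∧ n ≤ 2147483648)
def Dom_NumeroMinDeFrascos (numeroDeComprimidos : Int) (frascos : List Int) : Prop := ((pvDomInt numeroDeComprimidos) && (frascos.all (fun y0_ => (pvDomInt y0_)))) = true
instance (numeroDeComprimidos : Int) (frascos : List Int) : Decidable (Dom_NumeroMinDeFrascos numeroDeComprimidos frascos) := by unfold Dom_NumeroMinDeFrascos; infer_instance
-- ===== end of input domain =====

-- B replaces A's one-bottle-at-a-time while loop (re-running max() every iteration) by one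
-- descending sort followed by a single pass taking remaining//size bottles per size; equivalence
-- is about the RETURN value only (Python A mutates its `frascos` argument, B does not).

-- ===== PORT A =====
-- A's while loop, transliterated with a fuel parameter (each productive iteration either lowers
-- the pill count by the positive maximum or shortens the list, so this fuel suffices on Pre_;
-- on inputs where Python A raises ValueError on max([]) or loops forever, no value is claimed).
def pvLoopA : Nat → Int → List Int → Int → Int
  | 0, _, _, frascosUsados => frascosUsados
  | fuel + 1, numeroDeComprimidos, frascos, frascosUsados =>
    if numeroDeComprimidos > 0 then
      match PySem.List.max? frascos (fun y => y) with
      | none => frascosUsados  -- Python: max([]) raises ValueError (outside Pre_)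
      | some maiorFrasco =>
        if numeroDeComprimidos - maiorFrasco ≥ 0 then
          pvLoopA fuel (numeroDeComprimidos - maiorFrasco) frascos (frascosUsados + 1)
        else
          match PySem.List.remove? frascos maiorFrasco with
          | none => frascosUsados  -- unreachable: maiorFrasco ∈ frascos
          | some frascos' => pvLoopA fuel numeroDeComprimidos frascos' frascosUsados
    else frascosUsados

def NumeroMinDeFrascos (numeroDeComprimidos : Int) (frascos : List Int) : Int :=
  pvLoopA (numeroDeComprimidos.toNat + frascos.length + 1) numeroDeComprimidos frascos 0

-- ===== PORT B =====
-- B's for-loop over sorted(frascos, reverse=True) with an early break when no pills remain.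
def pvLoopB : List Int → Int → Int → Int
  | [], _, usados => usados
  | tamanho :: rest, numeroDeComprimidos, usados =>
    if numeroDeComprimidos ≤ 0 then usados
    else pvLoopB rest (PySem.Int.mod numeroDeComprimidos tamanho)
           (usados + PySem.Int.floordiv numeroDeComprimidos tamanho)

def NumeroMinDeFrascos_alt (numeroDeComprimidos : Int) (frascos : List Int) : Int :=
  pvLoopB (PySem.List.sorted frascos (fun y => y) true) numeroDeComprimidos 0

-- ===== PRECONDITION & SPEC =====
-- chained remainder of r under the sizes of l, taken left to right
def pvChainRes (r : Int) (l : List Int) : Int := l.foldl PySem.Int.mod r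

-- the positive bottle sizes in descending order
def pvPosDesc (frascos : List Int) : List Int :=
  PySem.List.sorted (frascos.filter (fun x => 0 < x)) (fun y => y) true

-- Pre_ is exactly where Python A returns: either no pills are needed, or greedily taking each
-- positive size in descending order leaves remainder 0; on every other input A raises
-- ValueError on max([]) or loops forever on a nonpositive maximum, so nothing is claimed there.
def Pre_NumeroMinDeFrascos (numeroDeComprimidos : Int) (frascos : List Int) : Prop :=
  numeroDeComprimidos ≤ 0 ∨ pvChainRes numeroDeComprimidos (pvPosDesc frascos) = 0
instance (numeroDeComprimidos : Int) (frascos : List Int) : Decidable (Pre_NumeroMinDeFrascos numeroDeComprimidos frascos) := by unfold Pre_NumeroMinDeFrascos; infer_instance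

def pvWitness_NumeroMinDeFrascos : Int × List Int := (10, [4, 3, 7])

def Spec_NumeroMinDeFrascos (numeroDeComprimidos : Int) (frascos : List Int) (out : Int) : Prop := out = NumeroMinDeFrascos_alt numeroDeComprimidos frascos
instance (numeroDeComprimidos : Int) (frascos : List Int) (out : Int) : Decidable (Spec_NumeroMinDeFrascos numeroDeComprimidos frascos out) := by unfold Spec_NumeroMinDeFrascos; infer_instance

-- ===== CLAIM (what is proved, stated in full; the proofs are below) =====
def Claim_equal_NumeroMinDeFrascos : Prop := ∀ (numeroDeComprimidos : Int) (frascos : List Int), Dom_NumeroMinDeFrascos numeroDeComprimidos frascos → Pre_NumeroMinDeFrascos numeroDeComprimidos frascos → Spec_NumeroMinDeFrascos numeroDeComprimidos frascos (NumeroMinDeFrascos numeroDeComprimidos frascos)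

-- ===== LEMMAS AND PROOFS =====

theorem pvLoopB_nonpos (l : List Int) (r u : Int) (h : r ≤ 0) : pvLoopB l r u = u := by
  cases l with
  | nil => rfl
  | cons a t => simp [pvLoopB, h]

theorem pvChainRes_cons (r a : Int) (l : List Int) :
    pvChainRes r (a :: l) = pvChainRes (PySem.Int.mod r a) l := rfl

-- sorting the filtered list = filtering the sorted list (both descending)
theorem pvSorted_rev_filter (fr : List Int) (p : Int → Bool) :
    PySem.List.sorted (fr.filter p) (fun y => y) true
      = (PySem.List.sorted fr (fun y => y) true).filter p := by
  apply List.Perm.eq_of_pairwise (le := fun a b : Int => b ≤ a)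
      (fun a b _ _ h1 h2 => le_antisymm h2 h1)
      (PySem.List.sorted_pairwise_rev _ _)
      ((PySem.List.sorted_pairwise_rev fr _).filter p)
  exact (PySem.List.sorted_perm _ _ _).trans ((PySem.List.sorted_perm fr _ _).filter p).symm

-- the tail of the descending sort is the descending sort of the list with its maximum erased
theorem pvSorted_rev_erase (fr : List Int) (m : Int) (t : List Int)
    (hS : PySem.List.sorted fr (fun y => y) true = m :: t) :
    PySem.List.sorted (fr.erase m) (fun y => y) true = t := by
  have hpt : t.Pairwise (fun a b : Int => b ≤ a) := by
    have := PySem.List.sorted_pairwise_rev fr (fun y : Int => y)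
    rw [hS] at this
    exact this.tail
  apply List.Perm.eq_of_pairwise (le := fun a b : Int => b ≤ a)
      (fun a b _ _ h1 h2 => le_antisymm h2 h1)
      (PySem.List.sorted_pairwise_rev _ _) hpt
  have hperm : (m :: t).Perm fr := hS ▸ PySem.List.sorted_perm fr _ _
  have : ((m :: t).erase m).Perm (fr.erase m) := hperm.erase m
  simpa using ((PySem.List.sorted_perm (fr.erase m) (fun y : Int => y) true).trans this.symm)

-- main invariant: on states whose positive-descending chained remainder is zero, A's while loop
-- computes exactly B's single pass over the sorted list
theorem pvLoopA_eq (fuel : Nat) : ∀ (r : Int) (fr : List Int) (u : Int),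
    0 ≤ r → pvChainRes r (pvPosDesc fr) = 0 → r.toNat + fr.length < fuel →
    pvLoopA fuel r fr u = pvLoopB (PySem.List.sorted fr (fun y => y) true) r u := by
  induction fuel with
  | zero => intro r fr u _ _ hf; omega
  | succ f ih =>
    intro r fr u hr hchain hf
    by_cases hpos : r > 0
    · -- the list cannot be empty: the chained remainder would be r ≠ 0
      have hfrne : fr ≠ [] := by
        intro h
        subst h
        simp [pvPosDesc, pvChainRes, PySem.List.sorted] at hchain
        omega
      obtain ⟨m, hm⟩ : ∃ m, PySem.List.max? fr (fun y => y) = some m := by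
        cases hmax : PySem.List.max? fr (fun y => y) with
        | none => exact absurd ((PySem.List.max?_eq_none_iff fr _).mp hmax) hfrne
        | some m => exact ⟨m, rfl⟩
      have hmmem : m ∈ fr := PySem.List.max?_mem hm
      have hmax : ∀ y ∈ fr, y ≤ m := PySem.List.max?_isMax hm
      -- the sorted list starts with the maximum
      obtain ⟨h0, t, hS⟩ : ∃ h0 t, PySem.List.sorted fr (fun y => y) true = h0 :: t := by
        cases hS : PySem.List.sorted fr (fun y => y) true with
        | nil => exact absurd ((PySem.List.sorted_eq_nil_iff fr _ _).mp hS) hfrne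
        | cons h0 t => exact ⟨h0, t, rfl⟩
      have hh0mem : h0 ∈ fr := by
        have := PySem.List.mem_sorted (x := h0) (xs := fr) (key := fun y : Int => y) (rev := true)
        rw [hS] at this; exact this.mp (by simp)
      have hh0max : ∀ y ∈ fr, y ≤ h0 := PySem.List.key_head_sorted_rev_ge fr _ hS
      have hh0 : h0 = m := le_antisymm (hmax h0 hh0mem) (hh0max m hmmem)
      subst hh0
      -- the maximum is positive, else the positive chain is empty and the remainder is r ≠ 0
      have hmpos : 0 < h0 := by
        by_contra hle
        have hfilt : fr.filter (fun x => 0 < x) = [] := by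
          rw [List.filter_eq_nil_iff]
          intro x hx
          simp only [decide_eq_true_eq]
          intro hxpos
          exact absurd (lt_of_lt_of_le hxpos (hmax x hx)) (by omega)
        rw [pvPosDesc, hfilt] at hchain
        simp [pvChainRes, PySem.List.sorted] at hchain
        omega
      have hposdesc : pvPosDesc fr = h0 :: t.filter (fun x => 0 < x) := by
        rw [pvPosDesc, pvSorted_rev_filter, hS]
        simp [hmpos]
      by_cases hsub : r - h0 ≥ 0
      · -- A uses a bottle of the largest size
        have hstep : pvLoopA (f + 1) r fr u = pvLoopA f (r - h0) fr (u + 1) := by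
          simp [pvLoopA, hpos, hm, show h0 ≤ r by omega]
        have hmodsub : PySem.Int.mod (r - h0) h0 = PySem.Int.mod r h0 := by
          rw [PySem.Int.mod_eq_emod_of_pos hmpos, PySem.Int.mod_eq_emod_of_pos hmpos]
          exact Int.sub_emod_right r h0
        have hchain' : pvChainRes (r - h0) (pvPosDesc fr) = 0 := by
          rw [hposdesc, pvChainRes_cons, hmodsub, ← pvChainRes_cons, ← hposdesc]
          exact hchain
        have hih := ih (r - h0) fr (u + 1) (by omega) hchain' (by omega)
        rw [hstep, hih, hS]
        -- both sides take the same division step of B (one bottle absorbed in the accumulator)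
        by_cases hrz : r - h0 = 0
        · have hmod0 : PySem.Int.mod r h0 = 0 := by
            rw [PySem.Int.mod_eq_emod_of_pos hmpos]
            have hreq : r = h0 := by omega
            rw [hreq]
            exact Int.emod_self
          have hdiv1 : PySem.Int.floordiv r h0 = 1 := by
            rw [PySem.Int.floordiv_eq_ediv_of_pos hmpos]
            have : r = h0 := by omega
            rw [this]
            exact Int.ediv_self (by omega)
          rw [pvLoopB_nonpos _ _ _ (by omega)]
          simp only [pvLoopB, if_neg (show ¬ (r ≤ 0) by omega), hmod0, hdiv1]
          rw [pvLoopB_nonpos _ _ _ le_rfl]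
        · have e2 : u + 1 + PySem.Int.floordiv (r - h0) h0 = u + PySem.Int.floordiv r h0 := by
            rw [PySem.Int.floordiv_eq_ediv_of_pos hmpos, PySem.Int.floordiv_eq_ediv_of_pos hmpos]
            have hdiv : (r - h0) / h0 = r / h0 + (-1) := by
              have := Int.add_mul_ediv_right r (-1) (by omega : h0 ≠ 0)
              simpa [sub_eq_add_neg] using this
            omega
          simp only [pvLoopB, if_neg (show ¬ (r - h0 ≤ 0) by omega),
            if_neg (show ¬ (r ≤ 0) by omega), hmodsub, e2]
      · -- largest bottle too big: A discards it
        have hrem : PySem.List.remove? fr h0 = some (fr.erase h0) :=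
          PySem.List.remove?_eq_some_erase fr h0 hmmem
        have hstep : pvLoopA (f + 1) r fr u = pvLoopA f r (fr.erase h0) u := by
          simp [pvLoopA, hpos, hm, hrem, show r < h0 by omega]
        rw [hstep]
        have hrlt : r < h0 := by omega
        have hmodself : PySem.Int.mod r h0 = r := by
          rw [PySem.Int.mod_eq_emod_of_pos hmpos]
          exact Int.emod_eq_of_lt hr hrlt
        have hchain' : pvChainRes r (pvPosDesc (fr.erase h0)) = 0 := by
          rw [pvPosDesc, pvSorted_rev_filter, pvSorted_rev_erase fr h0 t hS]
          rw [hposdesc, pvChainRes_cons, hmodself] at hchain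
          exact hchain
        have hlen : (fr.erase h0).length + 1 = fr.length := by
          rw [List.length_erase_of_mem hmmem]
          have : fr.length ≠ 0 := by simpa using List.length_pos_of_mem hmmem |>.ne'
          omega
        have hih := ih r (fr.erase h0) u hr hchain' (by omega)
        rw [hih, pvSorted_rev_erase fr h0 t hS, hS]
        have hdiv0 : PySem.Int.floordiv r h0 = 0 := by
          rw [PySem.Int.floordiv_eq_ediv_of_pos hmpos]
          exact Int.ediv_eq_zero_of_lt hr hrlt
        simp [pvLoopB, if_neg (show ¬ (r ≤ 0) by omega), hmodself, hdiv0]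
    · -- no pills needed: both sides stop immediately
      have hr0 : r = 0 := by omega
      subst hr0
      simp [pvLoopA]
      exact (pvLoopB_nonpos _ _ _ le_rfl).symm

-- ===== VERDICT (by name: the statement is the Claim_ definition above) =====
theorem NumeroMinDeFrascos_spec : Claim_equal_NumeroMinDeFrascos := by
  intro n fr _hdom hpre
  unfold Spec_NumeroMinDeFrascos NumeroMinDeFrascos NumeroMinDeFrascos_alt
  by_cases hpos : n > 0
  · have hchain : pvChainRes n (pvPosDesc fr) = 0 := by
      rcases hpre with h | h
      · omega
      · exact h
    exact pvLoopA_eq (n.toNat + fr.length + 1) n fr 0 (by omega) hchain (by omega)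
  · simp [pvLoopA, hpos]
    exact (pvLoopB_nonpos _ _ _ (by omega)).symm
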